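-- pv_equiv track=rewrite | github.com/AntonMulder/advent-of-code | 2015/day25/part-1.py | find_code
-- ===== SOURCE A (Python) =====
-- def find_code(stop_row, stop_col):
--     code = 20151125
--     row = 1
--     while True:
--         for col in range(row):
--             if (row - col) == stop_row and (col + 1) == stop_col:
--                 return code
--             code = (code * 252533) % 33554393
--         row += 1
-- ===== SOURCE B (Python) =====
-- def find_code(stop_row, stop_col):
--     d = stop_row + stop_col - 2
--     n = d * (d + 1) // 2 + stop_col - 1
--     return (20151125 * pow(252533, n, 33554393)) % 33554393
-- ===== Notes on version B (the rewrite author's own statement) =====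
-- stated objective: faster
-- what changed: Replaced the cell-by-cell diagonal walk with a closed-form step index from triangular numbering plus three-argument modular exponentiation pow(252533, n, 33554393).
-- outside the precondition, e.g. on find_code(0, 5): A does not finish within the time limit, B returns 77061
import Mathlib
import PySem

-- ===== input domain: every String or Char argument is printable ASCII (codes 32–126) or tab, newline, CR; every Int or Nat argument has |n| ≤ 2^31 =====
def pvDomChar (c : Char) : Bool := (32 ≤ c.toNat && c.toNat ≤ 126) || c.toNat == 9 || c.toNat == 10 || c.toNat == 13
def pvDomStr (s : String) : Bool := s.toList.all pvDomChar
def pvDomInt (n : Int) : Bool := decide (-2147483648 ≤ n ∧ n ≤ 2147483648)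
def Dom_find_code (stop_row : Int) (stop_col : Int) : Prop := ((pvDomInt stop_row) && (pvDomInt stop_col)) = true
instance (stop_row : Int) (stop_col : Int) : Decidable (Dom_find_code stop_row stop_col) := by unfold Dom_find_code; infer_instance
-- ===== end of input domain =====

-- B replaces A's cell-by-cell diagonal walk by a closed-form step index (triangular
-- numbering) and modular exponentiation; equivalence of the RETURN values on Pre_.

-- ===== PORT A =====
-- A's inner `for col in range(row)` loop: returns `.inl code` when the target cell is
-- hit, else `.inr` of the code after stepping once per column.
def pvInnerA (stop_row stop_col row : Int) : List Int → Int → Sum Int Int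
  | [], code => .inr code
  | col :: rest, code =>
    if row - col = stop_row ∧ col + 1 = stop_col then .inl code
    else pvInnerA stop_row stop_col row rest (PySem.Int.mod (code * 252533) 33554393)

-- A's `while True` outer loop, made total with fuel; under Pre_ the fuel
-- (stop_row + stop_col rows) is more than enough to reach the target cell.
def pvOuterA (stop_row stop_col : Int) : Nat → Int → Int → Int
  | 0, code, _ => code
  | fuel + 1, code, row =>
    match pvInnerA stop_row stop_col row (PySem.List.pyRange 0 row 1) code with
    | .inl c => c
    | .inr c => pvOuterA stop_row stop_col fuel c (row + 1)

def find_code (stop_row : Int) (stop_col : Int) : Int :=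
  pvOuterA stop_row stop_col (stop_row + stop_col).toNat 20151125 1

-- ===== PORT B =====
-- `pow(252533, n, 33554393)` is PySem.Int.powMod; `.toNat` on the exponent is exact
-- under Pre_ (there n ≥ 0).
def find_code_alt (stop_row : Int) (stop_col : Int) : Int :=
  let d := stop_row + stop_col - 2
  let n := PySem.Int.floordiv (d * (d + 1)) 2 + stop_col - 1
  PySem.Int.mod (20151125 * PySem.Int.powMod 252533 n.toNat 33554393) 33554393

-- ===== PRECONDITION & SPEC =====
-- Pre_ excludes stop_row < 1 or stop_col < 1: no grid cell has such coordinates and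
-- A's while-loop never returns there (it diverges).
def Pre_find_code (stop_row : Int) (stop_col : Int) : Prop := 1 ≤ stop_row ∧ 1 ≤ stop_col
instance (stop_row : Int) (stop_col : Int) : Decidable (Pre_find_code stop_row stop_col) := by unfold Pre_find_code; infer_instance
def pvWitness_find_code : Int × Int := (3, 4)
def Spec_find_code (stop_row : Int) (stop_col : Int) (out : Int) : Prop := out = find_code_alt stop_row stop_col
instance (stop_row : Int) (stop_col : Int) (out : Int) : Decidable (Spec_find_code stop_row stop_col out) := by unfold Spec_find_code; infer_instance

-- ===== CLAIM (what is proved, stated in full; the proofs are below) =====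
def Claim_equal_find_code : Prop := ∀ (stop_row : Int) (stop_col : Int), Dom_find_code stop_row stop_col → Pre_find_code stop_row stop_col → Spec_find_code stop_row stop_col (find_code stop_row stop_col)

-- ===== LEMMAS AND PROOFS =====

-- one multiplication step of A's code update
def pvStep (x : Int) : Int := PySem.Int.mod (x * 252533) 33554393

-- triangular numbers, recursively
def pvTri : Nat → Nat
  | 0 => 0
  | n + 1 => pvTri n + (n + 1)

lemma pvTri_mono {m n : Nat} (h : m ≤ n) : pvTri m ≤ pvTri n := by
  induction h with
  | refl => exact le_rfl
  | step _ ih => exact le_trans ih (Nat.le_add_right _ _)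

lemma pvTri_double (n : Nat) : 2 * pvTri n = n * (n + 1) := by
  induction n with
  | zero => rfl
  | succ k ih =>
    show 2 * (pvTri k + (k + 1)) = (k + 1) * (k + 2)
    rw [Nat.mul_add, ih]; ring

lemma pvInnerA_no_hit (sr sc row : Int) (cols : List Int) (code : Int)
    (h : ∀ col ∈ cols, ¬(row - col = sr ∧ col + 1 = sc)) :
    pvInnerA sr sc row cols code = .inr (pvStep^[cols.length] code) := by
  induction cols generalizing code with
  | nil => rfl
  | cons c rest ih =>
    have hc := h c (by simp)
    simp only [pvInnerA, if_neg hc, List.length_cons]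
    rw [ih _ (fun x hx => h x (by simp [hx]))]
    rw [Function.iterate_succ_apply]
    rfl

lemma pvInnerA_hit (sr sc : Int) (hsr : 1 ≤ sr) (_hsc : 1 ≤ sc) :
    ∀ (k : Nat) (a : Int) (code : Int), a + k = sc - 1 → 0 ≤ a →
    pvInnerA sr sc (sr + sc - 1) (PySem.List.pyRange a (sr + sc - 1) 1) code
      = .inl (pvStep^[k] code) := by
  intro k
  induction k with
  | zero =>
    intro a code ha _
    have halt : a < sr + sc - 1 := by omega
    rw [PySem.List.pyRange_one_cons halt]
    have hcond : sr + sc - 1 - a = sr ∧ a + 1 = sc := by omega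
    simp [pvInnerA, hcond]
  | succ j ih =>
    intro a code ha ha0
    have halt : a < sr + sc - 1 := by omega
    rw [PySem.List.pyRange_one_cons halt]
    have hcond : ¬(sr + sc - 1 - a = sr ∧ a + 1 = sc) := by omega
    simp only [pvInnerA, if_neg hcond]
    rw [ih (a + 1) _ (by omega) (by omega)]
    rw [Function.iterate_succ_apply]
    rfl

lemma pvOuterA_eq (sr sc : Int) (hsr : 1 ≤ sr) (hsc : 1 ≤ sc) :
    ∀ (fuel : Nat) (row code : Int), 1 ≤ row → row ≤ sr + sc - 1 →
    (sr + sc - 1 - row).toNat < fuel →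
    pvOuterA sr sc fuel code row
      = pvStep^[(pvTri (sr + sc - 2).toNat - pvTri (row - 1).toNat) + (sc - 1).toNat] code := by
  intro fuel
  induction fuel with
  | zero => intro row code _ _ hf; omega
  | succ f ih =>
    intro row code hrow1 hrow2 hf
    by_cases hend : row = sr + sc - 1
    · subst hend
      simp only [pvOuterA]
      rw [pvInnerA_hit sr sc hsr hsc (sc - 1).toNat 0 code (by omega) le_rfl]
      have : pvTri (sr + sc - 2).toNat - pvTri (sr + sc - 1 - 1).toNat = 0 := by
        have : sr + sc - 1 - 1 = sr + sc - 2 := by omega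
        rw [this]; omega
      rw [this, Nat.zero_add]
    · have hlt : row < sr + sc - 1 := lt_of_le_of_ne hrow2 hend
      simp only [pvOuterA]
      rw [pvInnerA_no_hit sr sc row _ code (by
        intro col hcol
        rw [PySem.List.mem_pyRange_one] at hcol
        omega)]
      rw [PySem.List.length_pyRange_one]
      show pvOuterA sr sc f (pvStep^[(row - 0).toNat] code) (row + 1)
        = pvStep^[pvTri (sr + sc - 2).toNat - pvTri (row - 1).toNat + (sc - 1).toNat] code
      rw [ih (row + 1) _ (by omega) (by omega) (by omega)]
      rw [← Function.iterate_add_apply]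
      congr 1
      have h1 : row.toNat = (row - 1).toNat + 1 := by omega
      have h2 : pvTri row.toNat = pvTri (row - 1).toNat + row.toNat := by
        rw [h1]; simp [pvTri]
      have h3 : (row + 1 - 1).toNat = row.toNat := by omega
      have h4 : pvTri row.toNat ≤ pvTri (sr + sc - 2).toNat := pvTri_mono (by omega)
      have h5 : pvTri (row - 1).toNat ≤ pvTri row.toNat := pvTri_mono (by omega)
      rw [h3]
      have h6 : (row - 0).toNat = row.toNat := by omega
      rw [h6]
      omega

lemma pvStep_iterate (k : Nat) :
    pvStep^[k] 20151125 = (20151125 * 252533 ^ k) % 33554393 := by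
  induction k with
  | zero => decide
  | succ j ih =>
    rw [Function.iterate_succ_apply', ih]
    show PySem.Int.mod ((20151125 * 252533 ^ j) % 33554393 * 252533) 33554393 = _
    rw [PySem.Int.mod_eq_emod_of_pos (by norm_num : (0:Int) < 33554393)]
    conv_rhs => rw [pow_succ, ← mul_assoc, Int.mul_emod]
    norm_num

lemma find_code_alt_eq (sr sc : Int) (hsr : 1 ≤ sr) (hsc : 1 ≤ sc) :
    find_code_alt sr sc
      = (20151125 * 252533 ^ (pvTri (sr + sc - 2).toNat + (sc - 1).toNat)) % 33554393 := by
  have h1 : ((sr + sc - 2).toNat : Int) = sr + sc - 2 := by omega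
  have ht : (sr + sc - 2) * (sr + sc - 2 + 1) = 2 * (pvTri (sr + sc - 2).toNat : Int) := by
    have h2 := congrArg (fun n : Nat => (n : Int)) (pvTri_double (sr + sc - 2).toNat)
    push_cast at h2
    rw [h1] at h2
    linarith
  unfold find_code_alt
  simp only [PySem.Int.powMod]
  rw [PySem.Int.floordiv_eq_ediv_of_pos (by norm_num : (0:Int) < 2)]
  rw [ht, Int.mul_ediv_cancel_left _ (by norm_num : (2:Int) ≠ 0)]
  have hn : ((pvTri (sr + sc - 2).toNat : Int) + sc - 1).toNat
      = pvTri (sr + sc - 2).toNat + (sc - 1).toNat := by omega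
  rw [hn]
  rw [PySem.Int.mod_eq_emod_of_pos (by norm_num : (0:Int) < 33554393),
      PySem.Int.mod_eq_emod_of_pos (by norm_num : (0:Int) < 33554393)]
  conv_rhs => rw [Int.mul_emod]
  norm_num

-- ===== VERDICT (by name: the statement is the Claim_ definition above) =====
theorem find_code_spec : Claim_equal_find_code := by
  intro sr sc _ hpre
  obtain ⟨hsr, hsc⟩ := hpre
  unfold Spec_find_code
  unfold find_code
  rw [pvOuterA_eq sr sc hsr hsc _ 1 20151125 le_rfl (by omega) (by omega)]
  rw [find_code_alt_eq sr sc hsr hsc]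
  have h0 : pvTri (1 - 1 : Int).toNat = 0 := by norm_num [pvTri]
  rw [h0, Nat.sub_zero, pvStep_iterate]
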